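-- pv_equiv track=rewrite | github.com/zgat/dino | 88.py | filter_new_replies
-- ===== SOURCE A (Python) =====
-- def filter_new_replies(data, last_max_ctime, is_top_reply=False):
--
--     replies_key = 'replies' if not is_top_reply else 'top_replies'
--     replies = [reply for reply in data.get('data', {}).get(replies_key, []) ]
--     if is_top_reply != True:
--         replies = [reply for reply in replies if reply.get('mid') == 212153] #如果是非置顶 需要筛选出一哥的回复
--     new_replies = [reply for reply in replies if reply.get('ctime') > last_max_ctime] #筛选出新的回复
--     if new_replies:
--         last_max_ctime = max(reply.get('ctime') for reply in new_replies) #存在新的回复，更新最大的ctime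
--     return new_replies, last_max_ctime
-- ===== SOURCE B (Python) =====
-- def filter_new_replies(data, last_max_ctime, is_top_reply=False):
--     key = 'top_replies' if is_top_reply else 'replies'
--     new_replies = []
--     max_ct = last_max_ctime
--     for reply in data.get('data', {}).get(key, []):
--         if is_top_reply or reply.get('mid') == 212153:
--             ct = reply.get('ctime')
--             if ct is not None and ct > last_max_ctime:
--                 new_replies.append(reply)
--                 if ct > max_ct:
--                     max_ct = ct
--     return new_replies, max_ct
-- ===== Notes on version B (the rewrite author's own statement) =====
-- stated objective: alternative
-- what changed: A builds the reply list with three successive list comprehensions and then a separate max() generator pass; B is one explicit loop over the raw replies that applies the mid/ctime tests inline and maintains the filtered list and the running maximum ctime together.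
import Mathlib
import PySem

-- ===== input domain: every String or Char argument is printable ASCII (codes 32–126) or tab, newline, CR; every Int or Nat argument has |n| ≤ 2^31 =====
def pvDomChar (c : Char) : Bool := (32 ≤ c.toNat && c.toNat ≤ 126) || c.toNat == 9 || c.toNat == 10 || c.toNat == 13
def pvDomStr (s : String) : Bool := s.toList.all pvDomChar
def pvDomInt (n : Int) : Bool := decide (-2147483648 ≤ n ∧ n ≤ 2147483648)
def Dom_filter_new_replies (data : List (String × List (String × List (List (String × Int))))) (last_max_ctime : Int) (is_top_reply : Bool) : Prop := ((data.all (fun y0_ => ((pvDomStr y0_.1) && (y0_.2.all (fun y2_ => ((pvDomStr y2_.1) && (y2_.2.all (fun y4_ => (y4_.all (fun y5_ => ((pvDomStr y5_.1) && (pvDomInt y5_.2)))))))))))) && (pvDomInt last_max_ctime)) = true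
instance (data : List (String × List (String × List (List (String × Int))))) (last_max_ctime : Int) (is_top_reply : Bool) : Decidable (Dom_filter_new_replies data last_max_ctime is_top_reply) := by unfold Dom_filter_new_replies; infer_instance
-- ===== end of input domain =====

-- B fuses A's three list-comprehension passes and the separate max() scan into one loop
-- maintaining the filtered list and the running maximum together (objective: alternative;
-- return-value equivalence only).

-- ===== PORT A =====
-- reply.get('ctime') > last_max_ctime: Python raises TypeError when get returns None;
-- the port maps that case to 'false' and Pre_ excludes those inputs.
def pvCtimeOk (last_max_ctime : Int) (reply : List (String × Int)) : Bool :=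
  match (PySem.Dict.mk reply).get? "ctime" with
  | some c => decide (c > last_max_ctime)
  | none => false

def filter_new_replies (data : List (String × List (String × List (List (String × Int))))) (last_max_ctime : Int) (is_top_reply : Bool) : (List (List (String × Int))) × Int :=
  let replies_key := if !is_top_reply then "replies" else "top_replies"
  let replies0 := (PySem.Dict.mk ((PySem.Dict.mk data).getD "data" [])).getD replies_key []
  let replies1 := replies0.map (fun reply => reply)
  let replies2 := if is_top_reply != true then
      replies1.filter (fun reply => (PySem.Dict.mk reply).get? "mid" == some 212153)
    else replies1
  let new_replies := replies2.filter (pvCtimeOk last_max_ctime)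
  if new_replies ≠ [] then
    (new_replies,
      (PySem.List.max? (new_replies.map (fun reply => ((PySem.Dict.mk reply).get? "ctime").getD 0)) (fun x => x)).getD last_max_ctime)
  else
    (new_replies, last_max_ctime)

-- ===== PORT B =====
def filter_new_replies_alt (data : List (String × List (String × List (List (String × Int))))) (last_max_ctime : Int) (is_top_reply : Bool) : (List (List (String × Int))) × Int :=
  let key := if is_top_reply then "top_replies" else "replies"
  let rs := (PySem.Dict.mk ((PySem.Dict.mk data).getD "data" [])).getD key []
  rs.foldl (fun acc reply =>
    if is_top_reply || (PySem.Dict.mk reply).get? "mid" == some 212153 then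
      match (PySem.Dict.mk reply).get? "ctime" with
      | some ct =>
        if ct > last_max_ctime then
          (acc.1 ++ [reply], if ct > acc.2 then ct else acc.2)
        else acc
      | none => acc
    else acc) ([], last_max_ctime)

-- ===== PRECONDITION & SPEC =====
-- Pre_ excludes inputs on which Python A raises TypeError: a reply that reaches the
-- 'ctime > last_max_ctime' comparison (i.e. survives the mid-filter) but has no 'ctime' key.
def Pre_filter_new_replies (data : List (String × List (String × List (List (String × Int))))) (last_max_ctime : Int) (is_top_reply : Bool) : Prop :=
  let key := if is_top_reply then "top_replies" else "replies"
  let rs := (PySem.Dict.mk ((PySem.Dict.mk data).getD "data" [])).getD key []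
  let sel := if is_top_reply then rs else rs.filter (fun r => (PySem.Dict.mk r).get? "mid" == some 212153)
  ∀ r ∈ sel, ((PySem.Dict.mk r).get? "ctime").isSome
instance (data : List (String × List (String × List (List (String × Int))))) (last_max_ctime : Int) (is_top_reply : Bool) : Decidable (Pre_filter_new_replies data last_max_ctime is_top_reply) := by unfold Pre_filter_new_replies; infer_instance

def pvWitness_filter_new_replies : (List (String × List (String × List (List (String × Int))))) × Int × Bool :=
  ([("data", [("replies", [[("mid", 212153), ("ctime", 5)], [("mid", 3)]])])], 1, false)

def Spec_filter_new_replies (data : List (String × List (String × List (List (String × Int))))) (last_max_ctime : Int) (is_top_reply : Bool) (out : (List (List (String × Int))) × Int) : Prop := out = filter_new_replies_alt data last_max_ctime is_top_reply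
instance (data : List (String × List (String × List (List (String × Int))))) (last_max_ctime : Int) (is_top_reply : Bool) (out : (List (List (String × Int))) × Int) : Decidable (Spec_filter_new_replies data last_max_ctime is_top_reply out) := by unfold Spec_filter_new_replies; infer_instance

-- ===== CLAIM (what is proved, stated in full; the proofs are below) =====
def Claim_equal_filter_new_replies : Prop := ∀ (data : List (String × List (String × List (List (String × Int))))) (last_max_ctime : Int) (is_top_reply : Bool), Dom_filter_new_replies data last_max_ctime is_top_reply → Pre_filter_new_replies data last_max_ctime is_top_reply → Spec_filter_new_replies data last_max_ctime is_top_reply (filter_new_replies data last_max_ctime is_top_reply)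
-- ===== LEMMAS AND PROOFS =====

-- value of B's fused fold: the filtered list appended to the accumulator, and the running max
def pvKeep (last_max_ctime : Int) (is_top_reply : Bool) (r : List (String × Int)) : Bool :=
  (is_top_reply || (PySem.Dict.mk r).get? "mid" == some 212153) && pvCtimeOk last_max_ctime r

def pvCtD (r : List (String × Int)) : Int := ((PySem.Dict.mk r).get? "ctime").getD 0

lemma foldB_eq (last_max_ctime : Int) (is_top_reply : Bool) (rs : List (List (String × Int)))
    (nr : List (List (String × Int))) (m : Int) :
    rs.foldl (fun acc reply =>
      if is_top_reply || (PySem.Dict.mk reply).get? "mid" == some 212153 then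
        match (PySem.Dict.mk reply).get? "ctime" with
        | some ct =>
          if ct > last_max_ctime then
            (acc.1 ++ [reply], if ct > acc.2 then ct else acc.2)
          else acc
        | none => acc
      else acc) (nr, m)
    = (nr ++ rs.filter (pvKeep last_max_ctime is_top_reply),
       (rs.filter (pvKeep last_max_ctime is_top_reply)).foldl (fun m r => max m (pvCtD r)) m) := by
  induction rs generalizing nr m with
  | nil => simp
  | cons r t ih =>
    by_cases hmid : (is_top_reply || (PySem.Dict.mk r).get? "mid" == some 212153) = true
    · rcases hc : (PySem.Dict.mk r).get? "ctime" with _ | c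
      · have hk : pvKeep last_max_ctime is_top_reply r = false := by
          simp [pvKeep, pvCtimeOk, hc]
        simp only [List.foldl_cons, List.filter_cons, hk, hmid, hc]
        simpa using ih nr m
      · by_cases hgt : c > last_max_ctime
        · have hk : pvKeep last_max_ctime is_top_reply r = true := by
            simp [pvKeep, pvCtimeOk, hc, hmid, hgt]
          have hmax : (if c > m then c else m) = max m (pvCtD r) := by
            simp [pvCtD, hc, max_def]; omega
          simp only [List.foldl_cons, List.filter_cons, hk, hmid, hc, if_pos hgt]
          rw [ih]
          simp [hmax, List.append_assoc]
        · have hk : pvKeep last_max_ctime is_top_reply r = false := by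
            simp [pvKeep, pvCtimeOk, hc, hgt]
          simp only [List.foldl_cons, List.filter_cons, hk, hmid, hc, if_neg hgt]
          simpa using ih nr m
    · have hk : pvKeep last_max_ctime is_top_reply r = false := by
        simp [pvKeep, Bool.not_eq_true] at hmid ⊢
        simp [hmid]
      simp only [List.foldl_cons, List.filter_cons, hk,
        Bool.not_eq_true] at *
      rw [if_neg (by simp [hmid])]
      simpa using ih nr m

-- A's selected-replies list is exactly the pvKeep-filter of the raw list
lemma sel_eq (last_max_ctime : Int) (is_top_reply : Bool) (rs : List (List (String × Int))) :
    (if is_top_reply != true then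
        rs.filter (fun reply => (PySem.Dict.mk reply).get? "mid" == some 212153)
      else rs).filter (pvCtimeOk last_max_ctime)
    = rs.filter (pvKeep last_max_ctime is_top_reply) := by
  cases is_top_reply with
  | true =>
    simp only [bne_self_eq_false, Bool.false_eq_true, if_false]
    apply List.filter_congr
    intro r _
    simp [pvKeep]
  | false =>
    rw [if_pos (by decide)]
    simp only [List.filter_filter]
    apply List.filter_congr
    intro r _
    simp [pvKeep, Bool.and_comm]

-- on the kept list the running max starting at last_max_ctime equals Python's max()
lemma snd_eq (last_max_ctime : Int) (is_top_reply : Bool) (nr : List (List (String × Int)))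
    (h : ∀ r ∈ nr, pvKeep last_max_ctime is_top_reply r = true) (hne : nr ≠ []) :
    (PySem.List.max? (nr.map pvCtD) (fun x => x)).getD last_max_ctime
    = nr.foldl (fun m r => max m (pvCtD r)) last_max_ctime := by
  cases nr with
  | nil => exact absurd rfl hne
  | cons r t =>
    have hr : pvCtD r > last_max_ctime := by
      have := h r (by simp)
      simp [pvKeep, pvCtimeOk] at this
      rcases hc : (PySem.Dict.mk r).get? "ctime" with _ | c
      · simp [hc] at this
      · simp [pvCtD, hc]; rw [hc] at this; simpa using this.2
    simp only [List.map_cons, PySem.List.max?_id_cons, Option.getD_some]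
    rw [List.foldl_map]
    have : max last_max_ctime (pvCtD r) = pvCtD r := by omega
    simp [this]

theorem filter_new_replies_agree (data : List (String × List (String × List (List (String × Int))))) (last_max_ctime : Int) (is_top_reply : Bool) :
    filter_new_replies data last_max_ctime is_top_reply
      = filter_new_replies_alt data last_max_ctime is_top_reply := by
  unfold filter_new_replies filter_new_replies_alt
  have hkey : (if !is_top_reply then "replies" else "top_replies")
      = (if is_top_reply then "top_replies" else "replies") := by cases is_top_reply <;> rfl
  rw [hkey]
  set rs := (PySem.Dict.mk ((PySem.Dict.mk data).getD "data" [])).getD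
      (if is_top_reply then "top_replies" else "replies") [] with hrs
  rw [foldB_eq]
  simp only [List.map_id_fun', id]
  have hsel := sel_eq last_max_ctime is_top_reply rs
  rw [hsel]
  set nr := rs.filter (pvKeep last_max_ctime is_top_reply) with hnr
  by_cases hne : nr = []
  · simp [hne]
  · rw [if_pos hne]
    have hmem : ∀ r ∈ nr, pvKeep last_max_ctime is_top_reply r = true := by
      intro r hrmem
      exact List.of_mem_filter hrmem
    have := snd_eq last_max_ctime is_top_reply nr hmem hne
    simp only [List.nil_append]
    rw [show (fun reply => ((PySem.Dict.mk reply).get? "ctime").getD 0) = pvCtD from rfl, this]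

-- ===== VERDICT (by name: the statement is the Claim_ definition above) =====
theorem filter_new_replies_spec : Claim_equal_filter_new_replies := by
  intro data last_max_ctime is_top_reply _ _
  unfold Spec_filter_new_replies
  exact filter_new_replies_agree data last_max_ctime is_top_reply
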